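-- pv_equiv track=rewrite | github.com/gremos/Semantic_DB_RAG | interactive/query_interface.py | _discover_missing_categories
-- ===== SOURCE A (Python) =====
-- from typing import List, Dict, Any, Optional, Tuple
--
-- def _discover_missing_categories(actual_columns: List[str], existing: Dict) -> Dict:
--     """Discover missing business categories from actual columns"""
--     discovered = {}
--
--     patterns = {
--         'customer': ['customer', 'client', 'account', 'user', 'owner', 'billing'],
--         'amount': ['amount', 'price', 'total', 'value', 'cost', 'fee'],
--         'date': ['date', 'time', 'created', 'modified', 'signed'],
--         'id': ['id', 'key', 'guid']
--     }
--
--     for category, keywords in patterns.items():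
--         if category not in existing:
--             matches = []
--             for col in actual_columns:
--                 col_lower = col.lower()
--                 if any(keyword in col_lower for keyword in keywords):
--                     matches.append(col)
--
--             if matches:
--                 discovered[category] = matches[:3]  # Limit to 3
--
--     return discovered
-- ===== SOURCE B (Python) =====
-- def _discover_missing_categories(actual_columns, existing):
--     """For each missing category an early-exit search collects at most 3 matching
--     columns and breaks out of the scan; the result dict is assembled back-to-front
--     by recursion over the pattern list."""
--     patterns = [
--         ('customer', ['customer', 'client', 'account', 'user', 'owner', 'billing']),
--         ('amount', ['amount', 'price', 'total', 'value', 'cost', 'fee']),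
--         ('date', ['date', 'time', 'created', 'modified', 'signed']),
--         ('id', ['id', 'key', 'guid']),
--     ]
--
--     def take_matches(cols, kws, k):
--         out = []
--         for col in cols:
--             if len(out) == k:
--                 break
--             if any(kw in col.lower() for kw in kws):
--                 out.append(col)
--         return out
--
--     def build(pats):
--         if not pats:
--             return {}
--         (cat, kws), rest = pats[0], pats[1:]
--         tail = build(rest)
--         if cat in existing:
--             return tail
--         ms = take_matches(actual_columns, kws, 3)
--         return {cat: ms, **tail} if ms else tail
--
--     return build(patterns)
-- ===== Notes on version B (the rewrite author's own statement) =====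
-- stated objective: alternative
-- what changed: A scans all columns for each category, builds the full match list and truncates it with [:3]; B runs an early-exit search per category that breaks out of the scan once 3 matches are collected (never building more than 3) and assembles the result dict back-to-front by recursion over the pattern list instead of mutating a dict in a loop.
import Mathlib
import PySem

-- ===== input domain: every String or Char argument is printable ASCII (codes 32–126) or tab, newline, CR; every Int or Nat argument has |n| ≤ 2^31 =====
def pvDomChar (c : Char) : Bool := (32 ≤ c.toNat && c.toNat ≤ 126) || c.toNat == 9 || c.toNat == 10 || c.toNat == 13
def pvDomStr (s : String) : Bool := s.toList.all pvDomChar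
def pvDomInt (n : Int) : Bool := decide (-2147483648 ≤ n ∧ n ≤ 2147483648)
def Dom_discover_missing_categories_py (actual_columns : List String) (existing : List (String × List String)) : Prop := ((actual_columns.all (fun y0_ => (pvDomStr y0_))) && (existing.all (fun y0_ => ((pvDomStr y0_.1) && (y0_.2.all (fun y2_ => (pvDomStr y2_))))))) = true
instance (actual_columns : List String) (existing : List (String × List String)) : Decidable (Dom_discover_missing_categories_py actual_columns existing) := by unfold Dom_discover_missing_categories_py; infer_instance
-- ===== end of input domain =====

-- B replaces A's scan-all-columns-then-truncate-to-3 per category by a recursive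
-- early-exit search that collects at most 3 matches and stops, with the result
-- assembled back-to-front by recursion over the pattern list; objective: alternative.

-- the fixed pattern table both Pythons carry as a literal
def pvPatterns : List (String × List String) :=
  [("customer", ["customer", "client", "account", "user", "owner", "billing"]),
   ("amount", ["amount", "price", "total", "value", "cost", "fee"]),
   ("date", ["date", "time", "created", "modified", "signed"]),
   ("id", ["id", "key", "guid"])]

-- ===== PORT A =====
-- 'discovered' is a dict whose keys are the four distinct category literals, each inserted
-- at most once, so each insertion is exactly an append to the association list.
def discover_missing_categories_py (actual_columns : List String) (existing : List (String × List String)) : List (String × List String) :=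
  pvPatterns.foldl (fun discovered ckw =>
    if existing.any (fun p => p.1 == ckw.1) then discovered
    else
      let matches_ := actual_columns.foldl (fun ms col =>
        let col_lower := PySem.Str.lower col
        if ckw.2.any (fun keyword => PySem.Str.isIn keyword col_lower) then ms ++ [col] else ms) []
      if matches_.isEmpty then discovered
      else discovered ++ [(ckw.1, PySem.List.slice matches_ none (some 3))]) []

-- ===== PORT B =====
-- Source B's take_matches: iterative early-exit search (breaks once out has k elements);
-- ported as structural recursion over cols carrying the 'out' accumulator
def pvTakeGo (kws : List String) (k : Nat) : List String → List String → List String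
  | [], out => out
  | col :: rest, out =>
    if out.length == k then out
    else if kws.any (fun kw => PySem.Str.isIn kw (PySem.Str.lower col)) then
      pvTakeGo kws k rest (out ++ [col])
    else pvTakeGo kws k rest out

def pvTakeMatches (cols : List String) (kws : List String) (k : Nat) : List String :=
  pvTakeGo kws k cols []

-- Source B's build: recursion over the pattern list, assembling the dict back-to-front;
-- {cat: ms, **tail} is a cons because the pattern categories are distinct, so cat
-- is never a key of tail.
def pvBuild (actual_columns : List String) (existing : List (String × List String)) : List (String × List String) → List (String × List String)
  | [] => []
  | (cat, kws) :: rest =>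
    let tail := pvBuild actual_columns existing rest
    if existing.any (fun p => p.1 == cat) then tail
    else
      let ms := pvTakeMatches actual_columns kws 3
      if ms.isEmpty then tail else (cat, ms) :: tail

def discover_missing_categories_py_alt (actual_columns : List String) (existing : List (String × List String)) : List (String × List String) :=
  pvBuild actual_columns existing pvPatterns

-- ===== PRECONDITION & SPEC =====
def Spec_discover_missing_categories_py (actual_columns : List String) (existing : List (String × List String)) (out : List (String × List String)) : Prop := out = discover_missing_categories_py_alt actual_columns existing
instance (actual_columns : List String) (existing : List (String × List String)) (out : List (String × List String)) : Decidable (Spec_discover_missing_categories_py actual_columns existing out) := by unfold Spec_discover_missing_categories_py; infer_instance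

-- ===== CLAIM (what is proved, stated in full; the proofs are below) =====
def Claim_equal_discover_missing_categories_py : Prop := ∀ (actual_columns : List String) (existing : List (String × List String)), Dom_discover_missing_categories_py actual_columns existing → Spec_discover_missing_categories_py actual_columns existing (discover_missing_categories_py actual_columns existing)

-- ===== LEMMAS AND PROOFS =====

-- A's inner column loop is a filter
theorem pvA_inner (acs : List String) (kws : List String) :
    acs.foldl (fun ms col =>
      if kws.any (fun keyword => PySem.Str.isIn keyword (PySem.Str.lower col)) then ms ++ [col] else ms) []
    = acs.filter (fun col => kws.any (fun keyword => PySem.Str.isIn keyword (PySem.Str.lower col))) := by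
  simpa using PySem.List.foldl_append_if_eq_filter (l := acs) (p := fun col => kws.any (fun keyword => PySem.Str.isIn keyword (PySem.Str.lower col))) (acc := [])

-- B's early-exit search, from any partial accumulator, completes it to the first
-- k elements of the filter
theorem pvTakeGo_eq (kws : List String) (k : Nat) (cols : List String) (out : List String)
    (h : out.length ≤ k) :
    pvTakeGo kws k cols out
    = out ++ (cols.filter (fun col => kws.any (fun kw => PySem.Str.isIn kw (PySem.Str.lower col)))).take (k - out.length) := by
  induction cols generalizing out with
  | nil => simp [pvTakeGo]
  | cons c cs ih =>
    by_cases hk : out.length = k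
    · simp [pvTakeGo, hk]
    · have hlt : out.length < k := lt_of_le_of_ne h hk
      by_cases hp : kws.any (fun kw => PySem.Str.isIn kw (PySem.Str.lower c)) = true
      · have : k - out.length = (k - (out.length + 1)) + 1 := by omega
        simp only [pvTakeGo, beq_iff_eq, hk, if_false, hp, if_true,
          ih (out ++ [c]) (by simp; omega), List.filter_cons, this, List.take_succ_cons,
          List.append_assoc, List.singleton_append, List.length_append, List.length_cons,
          List.length_nil]
      · simp only [pvTakeGo, beq_iff_eq, hk, if_false, hp, Bool.false_eq_true, ih out h,
          List.filter_cons]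

theorem pvTakeMatches_eq_take_filter (acs : List String) (kws : List String) (k : Nat) :
    pvTakeMatches acs kws k
    = (acs.filter (fun col => kws.any (fun kw => PySem.Str.isIn kw (PySem.Str.lower col)))).take k := by
  simpa using pvTakeGo_eq kws k acs [] (by simp)

-- A's outer fold (with its inner loop written as the filter it computes), over any
-- pattern list and accumulator, appends exactly B's build
theorem pvOuter (acs : List String) (existing : List (String × List String))
    (pats : List (String × List String)) (acc : List (String × List String)) :
    pats.foldl (fun discovered ckw =>
      if existing.any (fun p => p.1 == ckw.1) then discovered
      else
        let matches_ := acs.filter (fun col => ckw.2.any (fun keyword => PySem.Str.isIn keyword (PySem.Str.lower col)))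
        if matches_.isEmpty then discovered
        else discovered ++ [(ckw.1, PySem.List.slice matches_ none (some 3))]) acc
    = acc ++ pvBuild acs existing pats := by
  induction pats generalizing acc with
  | nil => simp [pvBuild]
  | cons ckw rest ih =>
    obtain ⟨cat, kws⟩ := ckw
    simp only [List.foldl_cons, pvBuild]
    by_cases hex : existing.any (fun p => p.1 == cat) = true
    · simp only [hex, if_true, ih]
    · have hslice : PySem.List.slice (acs.filter (fun col => kws.any (fun keyword => PySem.Str.isIn keyword (PySem.Str.lower col)))) none (some 3)
          = (acs.filter (fun col => kws.any (fun keyword => PySem.Str.isIn keyword (PySem.Str.lower col)))).take 3 := by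
        simpa using PySem.List.slice_to_natCast (acs.filter (fun col => kws.any (fun keyword => PySem.Str.isIn keyword (PySem.Str.lower col)))) 3
      have hms := pvTakeMatches_eq_take_filter acs kws 3
      by_cases hf : (acs.filter (fun col => kws.any (fun keyword => PySem.Str.isIn keyword (PySem.Str.lower col)))) = []
      · simp only [hex, Bool.false_eq_true, if_false, hms, hf, List.take_nil,
          List.isEmpty_nil, if_true, ih]
      · have h1 : ((acs.filter (fun col => kws.any (fun keyword => PySem.Str.isIn keyword (PySem.Str.lower col)))).isEmpty) = false := by
          rw [List.isEmpty_eq_false_iff]; exact hf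
        have h2 : (((acs.filter (fun col => kws.any (fun keyword => PySem.Str.isIn keyword (PySem.Str.lower col)))).take 3).isEmpty) = false := by
          rw [List.isEmpty_eq_false_iff, ne_eq, List.take_eq_nil_iff]
          rintro (h | h)
          · omega
          · exact hf h
        simp only [hex, Bool.false_eq_true, if_false, h1, hms, h2, hslice, ih,
          List.append_assoc, List.singleton_append]

-- ===== VERDICT (by name: the statement is the Claim_ definition above) =====
theorem discover_missing_categories_py_spec : Claim_equal_discover_missing_categories_py := by
  intro acs existing _
  show discover_missing_categories_py acs existing = discover_missing_categories_py_alt acs existing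
  unfold discover_missing_categories_py discover_missing_categories_py_alt
  simp only [pvA_inner]
  simpa using pvOuter acs existing pvPatterns []
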